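-- pv_equiv track=rewrite | github.com/deephaven/deephaven-plugins | plugins/python-remote-file-source/src/deephaven/python_remote_file_source/plugin_object.py | _is_module_in_top_level_names
-- ===== SOURCE A (Python) =====
-- def _is_module_in_top_level_names(
--     module_fullname: str, top_level_module_fullnames: set[str]
-- ) -> bool:
--     """
--     Check if a module fullname matches any of the top-level module names.
--     Args:
--         module_fullname: The full name of the module to check.
--         top_level_module_fullnames: The set of top-level module names to check against.
--     Returns:
--         bool: True if the module matches any top-level name, False otherwise.
--     """
--     if not top_level_module_fullnames:
--         return False
--
--     for top_level_name in top_level_module_fullnames: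
--         if module_fullname == top_level_name or module_fullname.startswith(
--             top_level_name + "."
--         ):
--             return True
--
--     return False
-- ===== SOURCE B (Python) =====
-- def _is_module_in_top_level_names(
--     module_fullname: str, top_level_module_fullnames: set[str]
-- ) -> bool:
--     """Single left-to-right scan: at each '.' test the accumulated dot-prefix
--     against the set; finally test the whole name. Membership lookups on prefixes
--     of the name replace per-member startswith scans."""
--     prefix_chars = []
--     for ch in module_fullname:
--         if ch == "." and "".join(prefix_chars) in top_level_module_fullnames:
--             return True
--         prefix_chars.append(ch)
--     return module_fullname in top_level_module_fullnames
-- ===== Notes on version B (the rewrite author's own statement) =====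
-- stated objective: alternative
-- what changed: Instead of scanning the whole set and running startswith(name + '.') for each member, B scans the module name once and tests each dot-prefix (and the full name) by set membership.
import Mathlib
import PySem

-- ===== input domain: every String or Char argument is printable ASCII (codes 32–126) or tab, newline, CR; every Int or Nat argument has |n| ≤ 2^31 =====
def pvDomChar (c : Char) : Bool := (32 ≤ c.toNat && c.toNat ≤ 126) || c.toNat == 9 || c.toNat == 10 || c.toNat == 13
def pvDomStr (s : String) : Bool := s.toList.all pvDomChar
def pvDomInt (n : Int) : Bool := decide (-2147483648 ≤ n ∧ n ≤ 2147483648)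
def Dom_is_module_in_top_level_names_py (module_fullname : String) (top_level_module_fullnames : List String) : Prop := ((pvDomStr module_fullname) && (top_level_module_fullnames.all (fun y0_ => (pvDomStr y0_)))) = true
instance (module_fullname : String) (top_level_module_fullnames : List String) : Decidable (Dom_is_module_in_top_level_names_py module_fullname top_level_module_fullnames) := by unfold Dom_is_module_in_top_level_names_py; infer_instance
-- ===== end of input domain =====

-- B replaces A's scan over the whole set (equality / startswith per member) by a single
-- left-to-right scan of the module name testing each dot-prefix by set membership (objective: alternative algorithm).


-- ===== PORT A =====
-- 'if not set: return False' then 'for t in set: if m == t or m.startswith(t + "."): return True; return False'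
def is_module_in_top_level_names_py (module_fullname : String) (top_level_module_fullnames : List String) : Bool :=
  if top_level_module_fullnames.isEmpty then false
  else top_level_module_fullnames.any (fun t =>
    module_fullname == t || PySem.Str.startswith module_fullname (t ++ "."))

-- ===== PORT B =====
-- B's loop over the characters of module_fullname, carrying the accumulated prefix;
-- at each '.' it tests the prefix against the set, at the end the full name.
def is_module_in_top_level_names_py_alt_loop (names : List String) (acc : List Char) : List Char → Bool
  | [] => names.contains (String.ofList acc)
  | c :: rest =>
      if c == '.' && names.contains (String.ofList acc) then true
      else is_module_in_top_level_names_py_alt_loop names (acc ++ [c]) rest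

def is_module_in_top_level_names_py_alt (module_fullname : String) (top_level_module_fullnames : List String) : Bool :=
  is_module_in_top_level_names_py_alt_loop top_level_module_fullnames [] module_fullname.toList

-- ===== PRECONDITION & SPEC =====
def Spec_is_module_in_top_level_names_py (module_fullname : String) (top_level_module_fullnames : List String) (out : Bool) : Prop := out = is_module_in_top_level_names_py_alt module_fullname top_level_module_fullnames
instance (module_fullname : String) (top_level_module_fullnames : List String) (out : Bool) : Decidable (Spec_is_module_in_top_level_names_py module_fullname top_level_module_fullnames out) := by unfold Spec_is_module_in_top_level_names_py; infer_instance

-- ===== CLAIM (what is proved, stated in full; the proofs are below) =====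
def Claim_equal_is_module_in_top_level_names_py : Prop := ∀ (module_fullname : String) (top_level_module_fullnames : List String), Dom_is_module_in_top_level_names_py module_fullname top_level_module_fullnames → Spec_is_module_in_top_level_names_py module_fullname top_level_module_fullnames (is_module_in_top_level_names_py module_fullname top_level_module_fullnames)

-- ===== LEMMAS AND PROOFS =====

/-- B's loop returns true iff the full word is in the set, or some dot in `rest`
    splits it so that the part before the dot (with `acc` in front) is in the set. -/
theorem alt_loop_iff (names : List String) (acc rest : List Char) :
    is_module_in_top_level_names_py_alt_loop names acc rest = true ↔
      (String.ofList (acc ++ rest) ∈ names ∨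
       ∃ pre suf, rest = pre ++ '.' :: suf ∧ String.ofList (acc ++ pre) ∈ names) := by
  induction rest generalizing acc with
  | nil =>
      simp [is_module_in_top_level_names_py_alt_loop]
  | cons c rest ih =>
      simp only [is_module_in_top_level_names_py_alt_loop]
      by_cases h : (c == '.' && names.contains (String.ofList acc)) = true
      · simp only [h, if_true, true_iff]
        simp only [Bool.and_eq_true, beq_iff_eq, List.contains_iff_mem] at h
        exact Or.inr ⟨[], rest, by simp [h.1], by simpa using h.2⟩
      · simp only [h, Bool.false_eq_true, if_false]
        rw [ih]
        simp only [Bool.and_eq_true, beq_iff_eq, List.contains_iff_mem] at h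
        constructor
        · rintro (hmem | ⟨pre, suf, hsplit, hpre⟩)
          · exact Or.inl (by simpa using hmem)
          · exact Or.inr ⟨c :: pre, suf, by simp [hsplit], by simpa using hpre⟩
        · rintro (hmem | ⟨pre, suf, hsplit, hpre⟩)
          · exact Or.inl (by simpa using hmem)
          · cases pre with
            | nil =>
                exfalso
                simp only [List.nil_append, List.cons.injEq] at hsplit
                exact h ⟨hsplit.1, by simpa using hpre⟩
            | cons c' pre' =>
                simp only [List.cons_append, List.cons.injEq] at hsplit
                exact Or.inr ⟨pre', suf, hsplit.2, by rw [hsplit.1]; simpa using hpre⟩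

/-- A returns true iff some member equals m or is a dot-prefix of m. -/
theorem a_iff (m : String) (names : List String) :
    is_module_in_top_level_names_py m names = true ↔
      ∃ t ∈ names, m = t ∨ (t.toList ++ ['.']).isPrefixOf m.toList := by
  unfold is_module_in_top_level_names_py
  by_cases he : names.isEmpty
  · simp [List.isEmpty_iff.mp he]
  · rw [if_neg he]
    simp only [List.any_eq_true, Bool.or_eq_true, beq_iff_eq]
    constructor
    · rintro ⟨t, ht, h | h⟩
      · exact ⟨t, ht, Or.inl h⟩
      · refine ⟨t, ht, Or.inr ?_⟩
        simpa [PySem.Str.startswith, PySem.Chars.startswith] using h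
    · rintro ⟨t, ht, h | h⟩
      · exact ⟨t, ht, Or.inl h⟩
      · exact ⟨t, ht, Or.inr (by simpa [PySem.Str.startswith, PySem.Chars.startswith] using h)⟩

-- ===== VERDICT (by name: the statement is the Claim_ definition above) =====
theorem is_module_in_top_level_names_py_spec : Claim_equal_is_module_in_top_level_names_py := by
  intro m names _
  unfold Spec_is_module_in_top_level_names_py
  rw [Bool.eq_iff_iff, a_iff, is_module_in_top_level_names_py_alt, alt_loop_iff]
  simp only [List.nil_append]
  constructor
  · rintro ⟨t, ht, rfl | hpref⟩
    · exact Or.inl (by simpa using ht)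
    · rcases List.isPrefixOf_iff_prefix.mp hpref with ⟨suf, hsuf⟩
      exact Or.inr ⟨t.toList, suf, by simpa using hsuf.symm, by simpa using ht⟩
  · rintro (hmem | ⟨pre, suf, hsplit, hpre⟩)
    · exact ⟨m, by simpa using hmem, Or.inl rfl⟩
    · refine ⟨String.ofList pre, hpre, Or.inr ?_⟩
      rw [List.isPrefixOf_iff_prefix]
      exact ⟨suf, by simp [hsplit]⟩
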